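-- pv_equiv track=rewrite | github.com/ajratner/dd-genomics | code/pheno_extract_candidates.py | enrich_phenos
-- ===== SOURCE A (Python) =====
-- def enrich_phenos(rows):
--   ret = []
--   for row in rows:
--     hpoid, phrase, entry_type = [x.strip() for x in row]
--     ret.append([hpoid, phrase, entry_type])
--     new_pheno = ''
--     if phrase.lower().startswith('abnormality of the'):
--       new_pheno = (phrase[len('abnormality of the ') + 1:]).strip()
--     if phrase.lower().startswith('abnormality of'):
--       new_pheno = (phrase[len('abnormality of') + 1:]).strip()
--     if phrase.lower().startswith('abnormal'):
--       new_pheno = (phrase[len('abnormal') + 1:]).strip()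
--     if len(new_pheno) > 0:
--       if len(new_pheno.split()) > 1:
--         ret.append([hpoid, new_pheno, 'MORPHED'])
--       aplasias = ['abnormality', 'abnormalities', 'physiology', \
--                   'morphology', 'dysplasia', 'hypoplasia', 'aplasia', \
--                   'hyperplasia']
--       next_pheno = new_pheno
--       for aplasia in aplasias:
--         if new_pheno.endswith(aplasia):
--           next_pheno = (new_pheno[:-len(aplasia)]).strip()
--       for aplasia in aplasias:
--         ret.append([hpoid, next_pheno + ' ' + aplasia, 'MORPHED'])
--
--   new_ret = []
--   for row in ret:
--     hpoid, pheno, entry_type = [x.strip() for x in row]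
--     words = pheno.split()
--     for word in words:
--       # just assuming that only one slash occurs per line
--       if '/' in word:
--         nword = []
--         nword.append(word.split('/')[0])
--         nword.append(word.split('/')[1])
--         new_pheno = pheno.replace(word, nword[0])
--         new_pheno = pheno.replace(word, nword[1])
--         new_ret.append([hpoid, new_pheno, 'SLASHED'])
--   ret = ret + new_ret
--   return ret
-- ===== SOURCE B (Python) =====
-- # B: fused single-pass variant of enrich_phenos. Each input row's emitted block
-- # (original + MORPHED rows) is built once by _expand and scanned immediately for
-- # slashed words; SLASHED rows are deferred to the end, which preserves A's
-- # two-pass output order. The three overlapping prefix tests collapse to the one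
-- # that always wins ('abnormal'), the last-match suffix loop becomes a
-- # first-match scan of the reversed suffix list, and the dead first replace
-- # (with the part before the slash) is dropped.
--
-- APLASIAS = ['abnormality', 'abnormalities', 'physiology', 'morphology',
--             'dysplasia', 'hypoplasia', 'aplasia', 'hyperplasia']
--
--
-- def _expand(hpoid, phrase, entry_type):
--     chunk = [[hpoid, phrase, entry_type]]
--     if phrase.lower().startswith('abnormal'):
--         new_pheno = phrase[9:].strip()
--         if new_pheno:
--             if len(new_pheno.split()) > 1:
--                 chunk.append([hpoid, new_pheno, 'MORPHED'])
--             base = new_pheno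
--             for a in reversed(APLASIAS):
--                 if new_pheno.endswith(a):
--                     base = new_pheno[:-len(a)].strip()
--                     break
--             chunk.extend([hpoid, base + ' ' + a, 'MORPHED'] for a in APLASIAS)
--     return chunk
--
--
-- def _slashed(hpoid, pheno_raw):
--     pheno = pheno_raw.strip()
--     out = []
--     for word in pheno.split():
--         if '/' in word:
--             out.append([hpoid, pheno.replace(word, word.split('/')[1]), 'SLASHED'])
--     return out
--
--
-- def enrich_phenos(rows):
--     main = []
--     deferred = []
--     for row in rows:
--         hpoid, phrase, entry_type = (x.strip() for x in row)
--         chunk = _expand(hpoid, phrase, entry_type)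
--         main += chunk
--         for r in chunk:
--             deferred += _slashed(r[0], r[1])
--     return main + deferred
-- ===== Notes on version B (the rewrite author's own statement) =====
-- stated objective: alternative
-- what changed: Fuses A's two passes into one loop that expands each row into its chunk (original + MORPHED rows) via a helper and immediately scans that chunk for slashed words into a deferred list returned at the end; the three overlapping prefix tests collapse to the single effective 'abnormal' one, the suffix-stripping loop becomes a first-match scan over the reversed suffix list, and the dead first replace is dropped.
import Mathlib
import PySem

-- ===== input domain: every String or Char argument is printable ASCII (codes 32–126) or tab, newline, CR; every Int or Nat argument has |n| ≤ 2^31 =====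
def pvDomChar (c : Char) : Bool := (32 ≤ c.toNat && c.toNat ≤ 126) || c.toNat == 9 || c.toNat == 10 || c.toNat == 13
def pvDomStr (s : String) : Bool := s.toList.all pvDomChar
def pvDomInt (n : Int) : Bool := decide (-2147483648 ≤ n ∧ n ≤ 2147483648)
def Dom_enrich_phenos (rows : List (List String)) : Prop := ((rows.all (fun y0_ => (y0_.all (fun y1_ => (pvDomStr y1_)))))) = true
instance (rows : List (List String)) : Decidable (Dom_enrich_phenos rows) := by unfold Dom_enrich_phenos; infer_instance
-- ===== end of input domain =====

set_option maxHeartbeats 1000000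


-- B fuses A's two passes into one loop (per-row chunk built once, SLASHed rows deferred),
-- collapses A's three overlapping prefix tests to the effective one, replaces the
-- last-match suffix loop by a first-match scan of the reversed list, and drops A's dead
-- first replace. Return values proved equal on all inputs where A returns (rows of length 3).

def aplasias : List String :=
  ["abnormality", "abnormalities", "physiology", "morphology",
   "dysplasia", "hypoplasia", "aplasia", "hyperplasia"]

-- ===== PORT A =====
-- (a row whose length is not 3 makes the Python unpacking raise: excluded by Pre_; the
--  match fallback skips such rows.  list[0]/list[1] after a successful '/' test cannot
--  fail in Python; ported with getD, the default being unreachable.)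
def enrich_phenos (rows : List (List String)) : List (List String) :=
  let ret : List (List String) := []
  let ret := rows.foldl (fun ret row =>
    match row.map PySem.Str.strip with
    | [hpoid, phrase, entry_type] =>
      let ret := ret ++ [[hpoid, phrase, entry_type]]
      let new_pheno : String := ""
      let new_pheno := if PySem.Str.startswith (PySem.Str.lower phrase) "abnormality of the"
        then PySem.Str.strip (PySem.Str.slice phrase (some 20) none) else new_pheno
      let new_pheno := if PySem.Str.startswith (PySem.Str.lower phrase) "abnormality of"
        then PySem.Str.strip (PySem.Str.slice phrase (some 15) none) else new_pheno
      let new_pheno := if PySem.Str.startswith (PySem.Str.lower phrase) "abnormal"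
        then PySem.Str.strip (PySem.Str.slice phrase (some 9) none) else new_pheno
      if 0 < PySem.Str.len new_pheno then
        let ret := if 1 < (PySem.Str.split₀ new_pheno).length
          then ret ++ [[hpoid, new_pheno, "MORPHED"]] else ret
        let next_pheno := aplasias.foldl (fun next_pheno aplasia =>
          if PySem.Str.endswith new_pheno aplasia
          then PySem.Str.strip (PySem.Str.slice new_pheno none (some (-(PySem.Str.len aplasia))))
          else next_pheno) new_pheno
        aplasias.foldl (fun ret aplasia =>
          ret ++ [[hpoid, PySem.Str.join " " [next_pheno, aplasia], "MORPHED"]]) ret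
      else ret
    | _ => ret) ret
  let new_ret : List (List String) := []
  let new_ret := ret.foldl (fun new_ret row =>
    match row.map PySem.Str.strip with
    | [hpoid, pheno, _entry_type] =>
      let words := PySem.Str.split₀ pheno
      words.foldl (fun new_ret word =>
        if PySem.Str.isIn "/" word then
          let nword0 := ((PySem.Str.split? word "/").getD []).getD 0 ""
          let nword1 := ((PySem.Str.split? word "/").getD []).getD 1 ""
          let _new_pheno := PySem.Str.replace pheno word nword0  -- dead, overwritten next line as in A
          let new_pheno := PySem.Str.replace pheno word nword1
          new_ret ++ [[hpoid, new_pheno, "SLASHED"]]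
        else new_ret) new_ret
    | _ => new_ret) new_ret
  ret ++ new_ret

-- ===== PORT B =====
def expandRow (hpoid phrase entry_type : String) : List (List String) :=
  let chunk := [[hpoid, phrase, entry_type]]
  if PySem.Str.startswith (PySem.Str.lower phrase) "abnormal" then
    let new_pheno := PySem.Str.strip (PySem.Str.slice phrase (some 9) none)
    if 0 < PySem.Str.len new_pheno then
      let chunk := if 1 < (PySem.Str.split₀ new_pheno).length
        then chunk ++ [[hpoid, new_pheno, "MORPHED"]] else chunk
      let base := ((aplasias.reverse.find? (PySem.Str.endswith new_pheno)).map
        (fun a => PySem.Str.strip (PySem.Str.slice new_pheno none (some (-(PySem.Str.len a)))))).getD new_pheno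
      chunk ++ aplasias.map (fun a => [hpoid, PySem.Str.join " " [base, a], "MORPHED"])
    else chunk
  else chunk

def slashedRows (hpoid : String) (pheno_raw : String) : List (List String) :=
  let pheno := PySem.Str.strip pheno_raw
  (PySem.Str.split₀ pheno).foldl (fun out word =>
    if PySem.Str.isIn "/" word then
      out ++ [[hpoid, PySem.Str.replace pheno word (((PySem.Str.split? word "/").getD []).getD 1 ""), "SLASHED"]]
    else out) []

def enrich_phenos_alt (rows : List (List String)) : List (List String) :=
  let acc := rows.foldl (fun (acc : List (List String) × List (List String)) row =>
    let s := row.map PySem.Str.strip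
    if s.length = 3 then
      let chunk := expandRow (s.getD 0 "") (s.getD 1 "") (s.getD 2 "")
      (acc.1 ++ chunk,
       chunk.foldl (fun d r => d ++ slashedRows (r.getD 0 "") (r.getD 1 "")) acc.2)
    else acc) (([] : List (List String)), ([] : List (List String)))
  acc.1 ++ acc.2

-- ===== PRECONDITION & SPEC =====
-- Pre_ excludes exactly the rows on which A raises (tuple unpacking of a row whose length is not 3).
def Pre_enrich_phenos (rows : List (List String)) : Prop := ∀ row ∈ rows, row.length = 3
instance (rows : List (List String)) : Decidable (Pre_enrich_phenos rows) := by unfold Pre_enrich_phenos; infer_instance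
def pvWitness_enrich_phenos : List (List String) :=
  [["HP:1", " Abnormal left/right hand morphology ", "EXACT"]]

def Spec_enrich_phenos (rows : List (List String)) (out : List (List String)) : Prop := out = enrich_phenos_alt rows
instance (rows : List (List String)) (out : List (List String)) : Decidable (Spec_enrich_phenos rows out) := by unfold Spec_enrich_phenos; infer_instance

-- ===== CLAIM (what is proved, stated in full; the proofs are below) =====
def Claim_equal_enrich_phenos : Prop := ∀ (rows : List (List String)), Dom_enrich_phenos rows → Pre_enrich_phenos rows → Spec_enrich_phenos rows (enrich_phenos rows)

-- ===== LEMMAS AND PROOFS =====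

theorem pv_dropWhile_self {α : Type} (p : α → Bool) (l : List α) :
    List.dropWhile p (List.dropWhile p l) = List.dropWhile p l := by
  rw [List.dropWhile_eq_self_iff]
  intro hl
  have h := List.head_dropWhile_not p (l := l) (by simpa using List.length_pos_iff.mp hl)
  simpa [List.head_eq_getElem] using h

theorem pv_head?_dropWhile {α : Type} (p : α → Bool) (l : List α) (a : α)
    (h : (List.dropWhile p l).head? = some a) : p a = false := by
  induction l with
  | nil => simp at h
  | cons b t ih =>
    rw [List.dropWhile_cons] at h
    by_cases hpb : p b = true
    · rw [if_pos hpb] at h; exact ih h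
    · rw [if_neg hpb] at h
      simp at h
      rw [← h]
      simpa using hpb

theorem pv_dropWhile_eq_self_of_head? {α : Type} (p : α → Bool) (l : List α)
    (h : ∀ a, l.head? = some a → p a = false) : List.dropWhile p l = l := by
  cases l with
  | nil => rfl
  | cons b t => rw [List.dropWhile_cons, if_neg (by simp [h b rfl])]

theorem pv_prefix_head? {α : Type} {X L : List α} (h : X <+: L) (hne : X ≠ []) :
    L.head? = X.head? := by
  obtain ⟨t, rfl⟩ := h
  cases X with
  | nil => exact absurd rfl hne
  | cons a xs => rfl

theorem pv_rstrip_idem (l : List Char) :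
    PySem.Chars.rstrip (PySem.Chars.rstrip l) = PySem.Chars.rstrip l := by
  unfold PySem.Chars.rstrip
  rw [List.reverse_reverse, pv_dropWhile_self]

theorem pv_lstrip_rstrip (l1 : List Char)
    (h1 : List.dropWhile PySem.Chars.isspace l1 = l1) :
    PySem.Chars.lstrip (PySem.Chars.rstrip l1) = PySem.Chars.rstrip l1 := by
  unfold PySem.Chars.lstrip PySem.Chars.rstrip
  apply pv_dropWhile_eq_self_of_head?
  intro a ha
  have hpre : (List.dropWhile PySem.Chars.isspace l1.reverse).reverse <+: l1 := by
    have h := List.reverse_prefix.mpr (List.dropWhile_suffix (l := l1.reverse) PySem.Chars.isspace)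
    rwa [List.reverse_reverse] at h
  have hne : (List.dropWhile PySem.Chars.isspace l1.reverse).reverse ≠ [] := by
    intro hnil; rw [hnil] at ha; simp at ha
  have hl1 : l1.head? = some a := by rw [pv_prefix_head? hpre hne]; exact ha
  exact pv_head?_dropWhile PySem.Chars.isspace l1 a (by rw [h1]; exact hl1)
  
theorem pv_chars_strip_idem (cs : List Char) :
    PySem.Chars.strip (PySem.Chars.strip cs) = PySem.Chars.strip cs := by
  unfold PySem.Chars.strip
  rw [pv_lstrip_rstrip (PySem.Chars.lstrip cs) (pv_dropWhile_self _ _), pv_rstrip_idem]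

theorem pv_strip_idem (s : String) :
    PySem.Str.strip (PySem.Str.strip s) = PySem.Str.strip s := by
  rw [← String.toList_inj]
  simp [pv_chars_strip_idem]

-- a last-match foldl equals a first-match scan over the reversed list
theorem pv_foldl_last_match {α β : Type} (p : α → Bool) (f : α → β) (l : List α) (x : β) :
    l.foldl (fun acc a => if p a then f a else acc) x =
      ((l.reverse.find? p).map f).getD x := by
  induction l generalizing x with
  | nil => rfl
  | cons a l ih =>
    rw [List.foldl_cons, ih, List.reverse_cons, List.find?_append]
    cases hf : l.reverse.find? p with
    | some b => simp
    | none => cases hpa : p a <;> simp [List.find?, hpa]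

-- the per-row chunk produced by A's first pass, as a function of the row
def chunkRow (row : List String) : List (List String) :=
  match row.map PySem.Str.strip with
  | [hpoid, phrase, entry_type] => expandRow hpoid phrase entry_type
  | _ => []

-- the SLASHED rows A's second pass produces from one row of ret
def slashRow (row : List String) : List (List String) :=
  match row.map PySem.Str.strip with
  | [hpoid, pheno, _entry_type] =>
    ((PySem.Str.split₀ pheno).filter (fun w => PySem.Str.isIn "/" w)).map (fun word =>
      [hpoid, PySem.Str.replace pheno word (((PySem.Str.split? word "/").getD []).getD 1 ""), "SLASHED"])
  | _ => []

theorem pv_stepA_eq (acc : List (List String)) (row : List String) :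
    (match row.map PySem.Str.strip with
    | [hpoid, phrase, entry_type] =>
      let ret := acc ++ [[hpoid, phrase, entry_type]]
      let new_pheno : String := ""
      let new_pheno := if PySem.Str.startswith (PySem.Str.lower phrase) "abnormality of the"
        then PySem.Str.strip (PySem.Str.slice phrase (some 20) none) else new_pheno
      let new_pheno := if PySem.Str.startswith (PySem.Str.lower phrase) "abnormality of"
        then PySem.Str.strip (PySem.Str.slice phrase (some 15) none) else new_pheno
      let new_pheno := if PySem.Str.startswith (PySem.Str.lower phrase) "abnormal"
        then PySem.Str.strip (PySem.Str.slice phrase (some 9) none) else new_pheno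
      if 0 < PySem.Str.len new_pheno then
        let ret := if 1 < (PySem.Str.split₀ new_pheno).length
          then ret ++ [[hpoid, new_pheno, "MORPHED"]] else ret
        let next_pheno := aplasias.foldl (fun next_pheno aplasia =>
          if PySem.Str.endswith new_pheno aplasia
          then PySem.Str.strip (PySem.Str.slice new_pheno none (some (-(PySem.Str.len aplasia))))
          else next_pheno) new_pheno
        aplasias.foldl (fun ret aplasia =>
          ret ++ [[hpoid, PySem.Str.join " " [next_pheno, aplasia], "MORPHED"]]) ret
      else ret
    | _ => acc) = acc ++ chunkRow row := by
  unfold chunkRow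
  generalize row.map PySem.Str.strip = m
  rcases m with _ | ⟨h1, _ | ⟨h2, _ | ⟨h3, _ | ⟨h4, t⟩⟩⟩⟩
  · simp
  · simp
  · simp
  · dsimp only
    by_cases hab : PySem.Str.startswith (PySem.Str.lower h2) "abnormal" = true
    · simp only [hab, if_true]
      rw [pv_foldl_last_match
            (PySem.Str.endswith (PySem.Str.strip (PySem.Str.slice h2 (some 9))))
            (fun a => PySem.Str.strip (PySem.Str.slice (PySem.Str.strip (PySem.Str.slice h2 (some 9)))
              none (some (-(PySem.Str.len a))))) aplasias,
          PySem.List.foldl_append_singleton_eq_map]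
      simp only [expandRow, hab, if_true]
      split_ifs <;> simp only [List.append_assoc, List.cons_append, List.nil_append]
    · have hab' : PySem.Chars.startswith (PySem.Chars.lower h2.toList)
          ['a', 'b', 'n', 'o', 'r', 'm', 'a', 'l'] = false := by
        have h0 : PySem.Str.startswith (PySem.Str.lower h2) "abnormal" = false :=
          Bool.eq_false_iff.mpr hab
        rw [PySem.Str.startswith_eq, PySem.Str.toList_lower] at h0
        simpa using h0
      have hof' : PySem.Chars.startswith (PySem.Chars.lower h2.toList)
          ['a', 'b', 'n', 'o', 'r', 'm', 'a', 'l', 'i', 't', 'y', ' ', 'o', 'f'] = false := by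
        cases hv : PySem.Chars.startswith (PySem.Chars.lower h2.toList)
            ['a', 'b', 'n', 'o', 'r', 'm', 'a', 'l', 'i', 't', 'y', ' ', 'o', 'f']
        · rfl
        · exfalso
          have h8 : PySem.Chars.startswith (PySem.Chars.lower h2.toList)
              ['a', 'b', 'n', 'o', 'r', 'm', 'a', 'l'] = true :=
            (PySem.Chars.startswith_iff _ _).mpr
              ((by decide : ['a', 'b', 'n', 'o', 'r', 'm', 'a', 'l'] <+:
                ['a', 'b', 'n', 'o', 'r', 'm', 'a', 'l', 'i', 't', 'y', ' ', 'o', 'f']).trans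
                ((PySem.Chars.startswith_iff _ _).mp hv))
          simp [hab'] at h8
      have hthe' : PySem.Chars.startswith (PySem.Chars.lower h2.toList)
          ['a', 'b', 'n', 'o', 'r', 'm', 'a', 'l', 'i', 't', 'y', ' ', 'o', 'f', ' ', 't', 'h', 'e'] = false := by
        cases hv : PySem.Chars.startswith (PySem.Chars.lower h2.toList)
            ['a', 'b', 'n', 'o', 'r', 'm', 'a', 'l', 'i', 't', 'y', ' ', 'o', 'f', ' ', 't', 'h', 'e']
        · rfl
        · exfalso
          have h8 : PySem.Chars.startswith (PySem.Chars.lower h2.toList)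
              ['a', 'b', 'n', 'o', 'r', 'm', 'a', 'l'] = true :=
            (PySem.Chars.startswith_iff _ _).mpr
              ((by decide : ['a', 'b', 'n', 'o', 'r', 'm', 'a', 'l'] <+:
                ['a', 'b', 'n', 'o', 'r', 'm', 'a', 'l', 'i', 't', 'y', ' ', 'o', 'f', ' ', 't', 'h', 'e']).trans
                ((PySem.Chars.startswith_iff _ _).mp hv))
          simp [hab'] at h8
      simp [expandRow, hab', hof', hthe']
  · simp

theorem pv_stepS_eq (acc : List (List String)) (row : List String) :
    (match row.map PySem.Str.strip with
    | [hpoid, pheno, _entry_type] =>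
      let words := PySem.Str.split₀ pheno
      words.foldl (fun new_ret word =>
        if PySem.Str.isIn "/" word then
          let nword0 := ((PySem.Str.split? word "/").getD []).getD 0 ""
          let nword1 := ((PySem.Str.split? word "/").getD []).getD 1 ""
          let _new_pheno := PySem.Str.replace pheno word nword0
          let new_pheno := PySem.Str.replace pheno word nword1
          new_ret ++ [[hpoid, new_pheno, "SLASHED"]]
        else new_ret) acc
    | _ => acc) = acc ++ slashRow row := by
  unfold slashRow
  generalize row.map PySem.Str.strip = m
  rcases m with _ | ⟨h1, _ | ⟨h2, _ | ⟨h3, _ | ⟨h4, t⟩⟩⟩⟩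
  · simp
  · simp
  · simp
  · exact PySem.List.foldl_append_if _ _ _ _
  · simp

theorem pv_slash_eq (h x y : String) (hh : PySem.Str.strip h = h) :
    slashRow [h, x, y] = slashedRows h x := by
  simp only [slashRow, slashedRows, List.map_cons, List.map_nil, hh,
    PySem.List.foldl_append_if]
  simp only [List.nil_append]

theorem pv_expand_shape (h p e : String) (r : List String) (hr : r ∈ expandRow h p e) :
    ∃ x y, r = [h, x, y] := by
  unfold expandRow at hr
  split_ifs at hr <;>
    simp only [List.mem_cons, List.not_mem_nil, or_false] at hr <;>
    aesop

theorem pv_chunk_shape (row r : List String) (hr : r ∈ chunkRow row) :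
    ∃ h x y, r = [h, x, y] ∧ PySem.Str.strip h = h := by
  unfold chunkRow at hr
  rcases row with _ | ⟨a, _ | ⟨b, _ | ⟨c, _ | ⟨d, t⟩⟩⟩⟩
  · exact absurd (show r ∈ ([] : List (List String)) from hr) (by simp)
  · exact absurd (show r ∈ ([] : List (List String)) from hr) (by simp)
  · exact absurd (show r ∈ ([] : List (List String)) from hr) (by simp)
  · obtain ⟨x, y, hxy⟩ := pv_expand_shape (PySem.Str.strip a) (PySem.Str.strip b)
      (PySem.Str.strip c) r (show r ∈ _ from hr)
    exact ⟨_, x, y, hxy, pv_strip_idem a⟩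
  · exact absurd (show r ∈ ([] : List (List String)) from hr) (by simp)

theorem pv_slashRow_of_chunk (row r : List String) (hr : r ∈ chunkRow row) :
    slashRow r = slashedRows (r.getD 0 "") (r.getD 1 "") := by
  obtain ⟨h, x, y, rfl, hh⟩ := pv_chunk_shape row r hr
  simpa using pv_slash_eq h x y hh

theorem pv_A_closed (rows : List (List String)) :
    enrich_phenos rows =
      rows.flatMap chunkRow ++ (rows.flatMap chunkRow).flatMap slashRow := by
  simp only [enrich_phenos]
  rw [PySem.List.foldl_congr_mem rows _ (fun acc row => acc ++ chunkRow row) _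
        (fun acc x _ => pv_stepA_eq acc x),
      PySem.List.foldl_append_eq_flatMap]
  rw [PySem.List.foldl_congr_mem _ _ (fun acc row => acc ++ slashRow row) _
        (fun acc x _ => pv_stepS_eq acc x),
      PySem.List.foldl_append_eq_flatMap]
  simp

theorem pv_B_fold (rows : List (List String)) (m d : List (List String)) :
    rows.foldl (fun (acc : List (List String) × List (List String)) row =>
      let s := row.map PySem.Str.strip
      if s.length = 3 then
        let chunk := expandRow (s.getD 0 "") (s.getD 1 "") (s.getD 2 "")
        (acc.1 ++ chunk,
         chunk.foldl (fun d r => d ++ slashedRows (r.getD 0 "") (r.getD 1 "")) acc.2)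
      else acc) (m, d) =
      (m ++ rows.flatMap chunkRow,
       d ++ rows.flatMap (fun row => (chunkRow row).flatMap
          (fun r => slashedRows (r.getD 0 "") (r.getD 1 "")))) := by
  induction rows generalizing m d with
  | nil => simp
  | cons a l ih =>
    rw [List.foldl_cons]
    have hstep :
        (let s := a.map PySem.Str.strip
        if s.length = 3 then
          let chunk := expandRow (s.getD 0 "") (s.getD 1 "") (s.getD 2 "")
          ((m, d).1 ++ chunk,
           chunk.foldl (fun d r => d ++ slashedRows (r.getD 0 "") (r.getD 1 "")) (m, d).2)
        else (m, d)) =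
        (m ++ chunkRow a,
         d ++ (chunkRow a).flatMap (fun r => slashedRows (r.getD 0 "") (r.getD 1 ""))) := by
      unfold chunkRow
      rcases a with _ | ⟨x, _ | ⟨y, _ | ⟨z, _ | ⟨w, t⟩⟩⟩⟩
      · simp
      · simp
      · simp
      · simp only [List.map_cons, List.map_nil, List.length_cons, List.length_nil,
          List.getD_cons_zero, List.getD_cons_succ]
        rw [if_pos trivial, PySem.List.foldl_append_eq_flatMap]
      · simp only [List.map_cons, List.length_cons]
        rw [if_neg (by omega)]
        simp
    rw [hstep, ih]
    simp [List.append_assoc]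

theorem pv_B_closed (rows : List (List String)) :
    enrich_phenos_alt rows =
      rows.flatMap chunkRow ++
        rows.flatMap (fun row => (chunkRow row).flatMap
          (fun r => slashedRows (r.getD 0 "") (r.getD 1 ""))) := by
  simp only [enrich_phenos_alt]
  rw [pv_B_fold]
  simp

-- ===== VERDICT (by name: the statement is the Claim_ definition above) =====
theorem enrich_phenos_spec : Claim_equal_enrich_phenos := by
  intro rows _ _
  unfold Spec_enrich_phenos
  rw [pv_A_closed, pv_B_closed, List.flatMap_assoc]
  have h2 : rows.flatMap (fun row => (chunkRow row).flatMap slashRow)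
      = rows.flatMap (fun row => (chunkRow row).flatMap
          (fun r => slashedRows (r.getD 0 "") (r.getD 1 ""))) :=
    List.flatMap_congr (fun row _ => List.flatMap_congr (fun r hr => pv_slashRow_of_chunk row r hr))
  rw [h2]
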